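-- pv_equiv track=rewrite | github.com/MathiasMoelgaard/CalciumAnalysis | LSTM_CNN.py | createTargets
-- ===== SOURCE A (Python) =====
-- def createTargets(annot, times = 20):
--     result = []
--     result.extend([0]*(annot[0])*times)
--     for i in range(len(annot)-1):
--         if i % 2 == 0:
--             result.extend([1]*(annot[i+1] - annot[i])*times)
--         else:
--             result.extend([0]*(annot[i+1] - annot[i])*times)
--     #result.extend([0]*(len(df) - annot[-1]*times))
--     return result
-- ===== SOURCE B (Python) =====
-- def createTargets(annot, times=20):
--     # Two-stage positional construction: allocate the full zero buffer once,
--     # compute each region's length from consecutive boundaries (with an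
--     # implicit leading 0), then overwrite only the odd regions -- the 1-runs --
--     # in place by slice assignment at their prefix-sum offsets.
--     b = [0] + list(annot)
--     lens = [max(0, hi - lo) * max(0, times) for lo, hi in zip(b, annot)]
--     out = [0] * sum(lens)
--     pos = 0
--     for j, L in enumerate(lens):
--         if j % 2 == 1:
--             out[pos:pos + L] = [1] * L
--         pos += L
--     return out
-- ===== Notes on version B (the rewrite author's own statement) =====
-- stated objective: alternative
-- what changed: Instead of appending alternating 0/1 blocks one after another, B allocates the whole output as a zero buffer of the total length up front and then overwrites only the 1-runs (the odd regions) in place by slice assignment at their prefix-sum offsets.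
import Mathlib
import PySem

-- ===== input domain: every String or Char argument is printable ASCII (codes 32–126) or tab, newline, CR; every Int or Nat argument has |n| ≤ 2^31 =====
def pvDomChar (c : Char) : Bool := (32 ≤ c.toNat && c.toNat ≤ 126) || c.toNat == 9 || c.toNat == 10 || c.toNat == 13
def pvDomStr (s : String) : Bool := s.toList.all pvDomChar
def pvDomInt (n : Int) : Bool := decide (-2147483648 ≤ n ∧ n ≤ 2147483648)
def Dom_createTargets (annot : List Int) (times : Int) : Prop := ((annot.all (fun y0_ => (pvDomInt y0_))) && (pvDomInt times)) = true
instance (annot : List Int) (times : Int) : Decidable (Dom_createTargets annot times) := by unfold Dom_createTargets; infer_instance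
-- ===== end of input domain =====

-- B builds the output positionally: it allocates the whole zero buffer up front and
-- overwrites only the 1-runs in place at their prefix-sum offsets (alternative construction).

-- ===== PORT A =====
/-- Python list repetition `xs * n`. Same value as `PySem.List.pyRepeat xs n` (proved in
`pvListMul_eq` below); the empty test only short-circuits evaluation, mirroring CPython's
upfront `len(xs) * n` allocation (`[] * n` is O(1) for any n). -/
def pvListMul {α : Type} (xs : List α) (n : Int) : List α :=
  if xs.isEmpty then [] else PySem.List.pyRepeat xs n

def createTargets (annot : List Int) (times : Int) : List Int :=
  match PySem.List.pyGet? annot 0 with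
  | none => []   -- annot[0] raises IndexError on empty annot; excluded by Pre_createTargets
  | some a0 =>
    let result : List Int := pvListMul (pvListMul [0] a0) times
    (PySem.List.pyRange 0 ((annot.length : Int) - 1) 1).foldl
      (fun result i =>
        if PySem.Int.mod i 2 = 0 then
          result ++ pvListMul (pvListMul [1]
            (PySem.List.pyGetD annot (i + 1) 0 - PySem.List.pyGetD annot i 0)) times
        else
          result ++ pvListMul (pvListMul [0]
            (PySem.List.pyGetD annot (i + 1) 0 - PySem.List.pyGetD annot i 0)) times)
      result

-- ===== PORT B =====
/-- Python slice assignment `out[pos:pos+L] = [1]*L`; exact here since `0 ≤ pos`, `0 ≤ L`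
and the replacement has the same length as the slice: take/replicate/drop splicing. -/
def pvSliceAssignOnes (out : List Int) (pos L : Int) : List Int :=
  out.take pos.toNat ++ List.replicate L.toNat 1 ++ out.drop (pos.toNat + L.toNat)

def createTargets_alt (annot : List Int) (times : Int) : List Int :=
  let b : List Int := 0 :: annot
  let lens : List Int := (b.zip annot).map (fun p => max 0 (p.2 - p.1) * max 0 times)
  let out : List Int := List.replicate lens.sum.toNat 0
  ((PySem.List.enumerate lens).foldl
      (fun s q =>
        ((if PySem.Int.mod q.1 2 = 1 then pvSliceAssignOnes s.1 s.2 q.2 else s.1),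
         s.2 + q.2))
      (out, (0 : Int))).1

-- ===== PRECONDITION & SPEC =====
-- Pre_ excludes only the empty annotation list, on which A raises IndexError (annot[0]).
def Pre_createTargets (annot : List Int) (times : Int) : Prop := annot ≠ []
instance (annot : List Int) (times : Int) : Decidable (Pre_createTargets annot times) := by unfold Pre_createTargets; infer_instance
def pvWitness_createTargets : List Int × Int := ([1, 2], 2)

def Spec_createTargets (annot : List Int) (times : Int) (out : List Int) : Prop := out = createTargets_alt annot times
instance (annot : List Int) (times : Int) (out : List Int) : Decidable (Spec_createTargets annot times out) := by unfold Spec_createTargets; infer_instance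

-- ===== CLAIM (what is proved, stated in full; the proofs are below) =====
def Claim_equal_createTargets : Prop := ∀ (annot : List Int) (times : Int), Dom_createTargets annot times → Pre_createTargets annot times → Spec_createTargets annot times (createTargets annot times)

-- ===== LEMMAS AND PROOFS =====

/-- Common shape of both programs' output: alternating blocks of `par`,
one per consecutive boundary pair. -/
def pvChunks (par prev : Int) (xs : List Int) (t : Int) : List Int :=
  match xs with
  | [] => []
  | x :: rest => List.replicate ((x - prev).toNat * t.toNat) par ++ pvChunks (1 - par) x rest t

/-- The same blocks, driven by the list of (nonnegative) block lengths. -/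
def pvChunksL (par : Int) (lens : List Int) : List Int :=
  match lens with
  | [] => []
  | L :: rest => List.replicate L.toNat par ++ pvChunksL (1 - par) rest

lemma pvListMul_eq {α : Type} (xs : List α) (n : Int) :
    pvListMul xs n = PySem.List.pyRepeat xs n := by
  cases xs with
  | nil => simp [pvListMul, PySem.List.pyRepeat]
  | cons x xs => rfl

/-- A's block `([l] * d) * t` is a replicate. -/
lemma pv_blockA (l d t : Int) :
    PySem.List.pyRepeat (PySem.List.pyRepeat [l] d) t
      = List.replicate (d.toNat * t.toNat) l := by
  rw [PySem.List.pyRepeat_singleton]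
  show (List.replicate t.toNat (List.replicate d.toNat l)).flatten = _
  induction t.toNat with
  | zero => simp
  | succ k ih =>
      simp [List.replicate_succ, ih, Nat.mul_succ, List.replicate_append_replicate,
        Nat.add_comm]

lemma pv_mod_succ (j : Int) (h : 0 ≤ j) :
    PySem.Int.mod (j + 1) 2 = 1 - PySem.Int.mod j 2 := by
  simp only [PySem.Int.mod, Int.fmod_eq_emod]
  omega

lemma pv_mod_two_nonneg (j : Int) : PySem.Int.mod j 2 = 0 ∨ PySem.Int.mod j 2 = 1 := by
  simp only [PySem.Int.mod, Int.fmod_eq_emod]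
  omega

/-- A's indexed loop from position `i` computes `pvChunks` of the tail. -/
lemma pv_A_eq (k : Nat) (full : List Int) (t : Int) (i : Nat)
    (hk : full.length - 1 - i = k) (hi : i < full.length) :
    (PySem.List.pyRange (i : Int) ((full.length : Int) - 1) 1).flatMap (fun idx =>
        if PySem.Int.mod idx 2 = 0 then
          PySem.List.pyRepeat (PySem.List.pyRepeat [1]
            (PySem.List.pyGetD full (idx + 1) 0 - PySem.List.pyGetD full idx 0)) t
        else
          PySem.List.pyRepeat (PySem.List.pyRepeat [0]
            (PySem.List.pyGetD full (idx + 1) 0 - PySem.List.pyGetD full idx 0)) t)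
      = pvChunks (PySem.Int.mod ((i : Int) + 1) 2) (full.getD i 0) (full.drop (i + 1)) t := by
  induction k generalizing i with
  | zero =>
      have hge : full.length - 1 ≤ i := by omega
      rw [PySem.List.pyRange_one_eq_nil (by omega)]
      have : full.drop (i + 1) = [] := List.drop_eq_nil_of_le (by omega)
      simp [this, pvChunks]
  | succ k ih =>
      have hlt : i + 1 < full.length := by omega
      rw [PySem.List.pyRange_one_cons (by omega), List.flatMap_cons]
      have hg1 : PySem.List.pyGetD full ((i : Int) + 1) 0 = full.getD (i + 1) 0 := by
        rw [show ((i : Int) + 1) = ((i + 1 : Nat) : Int) by push_cast; ring,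
          PySem.List.pyGetD_natCast]
      have hg0 : PySem.List.pyGetD full (i : Int) 0 = full.getD i 0 := by
        rw [PySem.List.pyGetD_natCast]
      have hdrop : full.drop (i + 1) = full.getD (i + 1) 0 :: full.drop (i + 2) := by
        rw [List.getD_eq_getElem _ _ hlt]
        rw [List.drop_eq_getElem_cons hlt]
      have hhead : (if PySem.Int.mod (i : Int) 2 = 0 then
          PySem.List.pyRepeat (PySem.List.pyRepeat [1]
            (PySem.List.pyGetD full ((i : Int) + 1) 0 - PySem.List.pyGetD full (i : Int) 0)) t
        else
          PySem.List.pyRepeat (PySem.List.pyRepeat [0]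
            (PySem.List.pyGetD full ((i : Int) + 1) 0 - PySem.List.pyGetD full (i : Int) 0)) t)
          = List.replicate ((full.getD (i + 1) 0 - full.getD i 0).toNat * t.toNat)
              (PySem.Int.mod ((i : Int) + 1) 2) := by
        rw [hg0, hg1]
        rcases pv_mod_two_nonneg (i : Int) with h | h
        · rw [if_pos h, pv_blockA, pv_mod_succ _ (by exact Int.natCast_nonneg _), h]; norm_num
        · rw [if_neg (by omega), pv_blockA, pv_mod_succ _ (by exact Int.natCast_nonneg _), h]; norm_num
      rw [hhead]
      have hrest := ih (i + 1) (by omega) hlt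
      rw [show ((i : Int) + 1) = ((i + 1 : Nat) : Int) by push_cast; ring]
      rw [hrest, hdrop]
      simp only [pvChunks]
      rw [pv_mod_succ ((i + 1 : Nat) : Int) (Int.natCast_nonneg _)]

/-- `pvChunks` from boundaries is `pvChunksL` of the computed lengths. -/
lemma pv_chunks_eq_chunksL (xs : List Int) (par prev t : Int) :
    pvChunks par prev xs t
      = pvChunksL par (((prev :: xs).zip xs).map (fun p => max 0 (p.2 - p.1) * max 0 t)) := by
  induction xs generalizing par prev with
  | nil => simp [pvChunks, pvChunksL]
  | cons x rest ih =>
      rw [List.zip_cons_cons, List.map_cons]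
      show _ = pvChunksL par (max 0 (x - prev) * max 0 t :: _)
      unfold pvChunks pvChunksL
      rw [ih]
      congr 2
      have h : max 0 (x - prev) * max 0 t = (((x - prev).toNat * t.toNat : Nat) : Int) := by
        rw [max_comm 0 (x - prev), max_comm 0 t, ← Int.ofNat_toNat, ← Int.ofNat_toNat]
        push_cast; ring
      rw [h, Int.toNat_natCast]

/-- The fill loop of B: starting from a finished prefix `done` followed by a zero
buffer of the total remaining length, it appends exactly the alternating chunks. -/
lemma pv_fill_eq (lens : List Int) (j : Int) (done : List Int)
    (hlens : ∀ L ∈ lens, 0 ≤ L) (hj : 0 ≤ j) :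
    ((PySem.List.enumerate lens j).foldl
        (fun s q =>
          ((if PySem.Int.mod q.1 2 = 1 then pvSliceAssignOnes s.1 s.2 q.2 else s.1),
           s.2 + q.2))
        (done ++ List.replicate lens.sum.toNat 0, (done.length : Int))).1
      = done ++ pvChunksL (PySem.Int.mod j 2) lens := by
  induction lens generalizing j done with
  | nil => simp [pvChunksL]
  | cons L rest ih =>
      have hL : 0 ≤ L := hlens L (by simp)
      have hs : 0 ≤ rest.sum := List.sum_nonneg (fun x hx => hlens x (by simp [hx]))
      have hsum : (L :: rest).sum.toNat = L.toNat + rest.sum.toNat := by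
        simp only [List.sum_cons]; omega
      rw [PySem.List.enumerate_cons, List.foldl_cons]
      have hbuf : done ++ List.replicate (L :: rest).sum.toNat 0
          = (done ++ List.replicate L.toNat 0) ++ List.replicate rest.sum.toNat 0 := by
        rw [hsum, List.replicate_add, List.append_assoc]
      have hstep :
          (if PySem.Int.mod j 2 = 1 then
              pvSliceAssignOnes (done ++ List.replicate (L :: rest).sum.toNat 0)
                (done.length : Int) L
            else done ++ List.replicate (L :: rest).sum.toNat 0)
          = (done ++ List.replicate L.toNat (PySem.Int.mod j 2))
              ++ List.replicate rest.sum.toNat 0 := by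
        rcases pv_mod_two_nonneg j with h | h
        · rw [h, if_neg (by norm_num), hbuf]
        · rw [h, if_pos rfl]
          unfold pvSliceAssignOnes
          rw [hbuf]
          have hnat : (done.length : Int).toNat = done.length := by simp
          have hlen2 : done.length + L.toNat
              = (done ++ List.replicate L.toNat 0).length := by simp
          have htake : List.take done.length
              (done ++ List.replicate L.toNat 0 ++ List.replicate rest.sum.toNat 0) = done := by
            rw [List.append_assoc, List.take_left]
          have hdrop2 : List.drop (done.length + L.toNat)
              (done ++ List.replicate L.toNat 0 ++ List.replicate rest.sum.toNat 0)
              = List.replicate rest.sum.toNat 0 := by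
            rw [hlen2, List.drop_left]
          rw [hnat, htake, hdrop2, List.append_assoc]
      rw [hstep]
      have hpos : (done.length : Int) + L
          = (((done ++ List.replicate L.toNat (PySem.Int.mod j 2)).length : Nat) : Int) := by
        simp; omega
      rw [hpos]
      rw [ih (j + 1) _ (fun x hx => hlens x (by simp [hx])) (by omega)]
      rw [pv_mod_succ j hj]
      simp [pvChunksL]

-- ===== VERDICT (by name: the statement is the Claim_ definition above) =====
theorem createTargets_spec : Claim_equal_createTargets := by
  intro annot times _ hpre
  unfold Spec_createTargets
  match annot, hpre with
  | a0 :: rest, _ =>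
    unfold createTargets createTargets_alt
    simp only [pvListMul_eq]
    have hget : PySem.List.pyGet? (a0 :: rest) 0 = some a0 := by
      simp [PySem.List.pyGet?, PySem.List.pyIdx?]
    rw [hget]
    simp only []
    -- A side: foldl of appends → flatMap → pvChunks
    have hfun : (fun (result : List Int) (i : Int) =>
        if PySem.Int.mod i 2 = 0 then
          result ++ PySem.List.pyRepeat (PySem.List.pyRepeat [1]
            (PySem.List.pyGetD (a0 :: rest) (i + 1) 0 - PySem.List.pyGetD (a0 :: rest) i 0)) times
        else
          result ++ PySem.List.pyRepeat (PySem.List.pyRepeat [0]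
            (PySem.List.pyGetD (a0 :: rest) (i + 1) 0 - PySem.List.pyGetD (a0 :: rest) i 0)) times)
        = (fun (result : List Int) (i : Int) => result ++
            (if PySem.Int.mod i 2 = 0 then
              PySem.List.pyRepeat (PySem.List.pyRepeat [1]
                (PySem.List.pyGetD (a0 :: rest) (i + 1) 0 - PySem.List.pyGetD (a0 :: rest) i 0)) times
            else
              PySem.List.pyRepeat (PySem.List.pyRepeat [0]
                (PySem.List.pyGetD (a0 :: rest) (i + 1) 0 - PySem.List.pyGetD (a0 :: rest) i 0)) times)) := by
      funext acc i; split <;> rfl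
    rw [hfun, PySem.List.foldl_append_eq_flatMap]
    have hA := pv_A_eq ((a0 :: rest).length - 1 - 0) (a0 :: rest) times 0 rfl (by simp)
    rw [show ((0 : Nat) : Int) = (0 : Int) by rfl] at hA
    rw [hA]
    -- B side: fill loop → pvChunksL → pvChunks
    have hB := pv_fill_eq (((0 :: a0 :: rest).zip (a0 :: rest)).map
        (fun p => max 0 (p.2 - p.1) * max 0 times)) 0 []
      (by
        intro L hL
        simp only [List.mem_map] at hL
        obtain ⟨p, -, hp⟩ := hL
        exact hp ▸ mul_nonneg (le_max_left 0 _) (le_max_left 0 _)) le_rfl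
    simp only [List.nil_append, List.length_nil, Nat.cast_zero] at hB
    rw [hB, ← pv_chunks_eq_chunksL]
    have h0 : PySem.Int.mod 0 2 = 0 := by simp [PySem.Int.mod]
    have h1 : PySem.Int.mod (0 + 1 : Int) 2 = 1 := by simp [PySem.Int.mod]
    rw [h0, h1]
    simp only [pvChunks, List.getD_cons_zero, List.drop_succ_cons, List.drop_zero]
    rw [pv_blockA, Int.sub_zero]
    norm_num
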